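-- pv_equiv track=rewrite | github.com/dtg57/project-euler | unsolved/148 - Exploring Pascal's triangle.py | checkdiv7
-- ===== SOURCE A (Python) =====
-- def nextrow(lastrow):
--     lastrow = [0] + lastrow
--     row = []
--     if len(lastrow) % 2 == 0:
--         for i in range((len(lastrow)) // 2):
--             row.append(lastrow[i] + lastrow[i + 1])
--         row = row + row[::-1]
--         return row
--     else:
--         for i in range((len(lastrow) + 1) // 2):
--             row.append(lastrow[i] + lastrow[i + 1])
--         temp = row[:-1]
--         row = row + temp[::-1]
--         return row
--
-- def pascal(rows):
--     triangle = [[1]]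
--     for i in range(rows - 1):
--         triangle.append(nextrow(triangle[-1]))
--     return triangle
--
-- def checkdiv7(rows):
--     triangle = pascal(rows)
--     primes = [2, 3, 5, 7]
--     divcount = {2:0, 3:0, 5:0, 7:0}
--     for a in triangle:
--         for b in a:
--             for i in primes:
--                 if b % i == 0:
--                     divcount[i] += 1
--     return divcount
-- ===== SOURCE B (Python) =====
-- def checkdiv7(rows):
--     # Kummer/Lucas: in row n, the number of entries NOT divisible by the prime p
--     # equals the product of (d+1) over the base-p digits d of n.
--     n_rows = rows if rows > 1 else 1
--     result = {}
--     for p in (2, 3, 5, 7):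
--         total = 0
--         for n in range(n_rows):
--             prod = 1
--             m = n
--             while m > 0:
--                 prod *= m % p + 1
--                 m //= p
--             total += n + 1 - prod
--         result[p] = total
--     return result
-- ===== Notes on version B (the rewrite author's own statement) =====
-- stated objective: faster
-- what changed: Instead of materialising the whole Pascal triangle with bigint additions and testing every entry, B computes for each prime p the per-row count of non-divisible entries as the product of (digit+1) over the base-p digits of the row index (Lucas/Kummer) and sums row totals.
import Mathlib
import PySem

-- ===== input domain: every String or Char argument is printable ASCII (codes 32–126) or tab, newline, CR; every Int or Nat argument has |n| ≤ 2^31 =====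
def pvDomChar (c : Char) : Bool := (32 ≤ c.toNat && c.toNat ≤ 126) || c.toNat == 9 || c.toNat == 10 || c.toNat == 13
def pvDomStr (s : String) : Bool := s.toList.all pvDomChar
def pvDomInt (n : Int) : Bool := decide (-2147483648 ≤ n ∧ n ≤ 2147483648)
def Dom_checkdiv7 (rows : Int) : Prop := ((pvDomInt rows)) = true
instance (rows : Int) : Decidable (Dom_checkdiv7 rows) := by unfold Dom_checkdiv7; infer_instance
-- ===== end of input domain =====

-- B replaces the O(rows^2)-entry triangle walk by Lucas/Kummer per-row digit products (asymptotically faster).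

-- ===== PORT A =====
def nextrow (lastrow0 : List Int) : List Int :=
  let lastrow := 0 :: lastrow0
  if PySem.Int.mod (lastrow.length : Int) 2 == 0 then
    let row := (PySem.List.pyRange 0 (PySem.Int.floordiv (lastrow.length : Int) 2) 1).foldl
      (fun r i => r ++ [PySem.List.pyGetD lastrow i 0 + PySem.List.pyGetD lastrow (i + 1) 0]) []
    row ++ row.reverse
  else
    let row := (PySem.List.pyRange 0 (PySem.Int.floordiv ((lastrow.length : Int) + 1) 2) 1).foldl
      (fun r i => r ++ [PySem.List.pyGetD lastrow i 0 + PySem.List.pyGetD lastrow (i + 1) 0]) []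
    let temp := PySem.List.slice row none (some (-1))
    row ++ temp.reverse

def pascal (rows : Int) : List (List Int) :=
  (PySem.List.pyRange 0 (rows - 1) 1).foldl
    (fun tri _ => tri ++ [nextrow (PySem.List.pyGetD tri (-1) [])]) [[1]]

def checkdiv7 (rows : Int) : List (Int × Int) :=
  let triangle := pascal rows
  let primes : List Int := [2, 3, 5, 7]
  let divcount : PySem.Dict Int Int := PySem.Dict.ofList [(2, 0), (3, 0), (5, 0), (7, 0)]
  (triangle.foldl (fun d a =>
    a.foldl (fun d b =>
      primes.foldl (fun d i =>
        if PySem.Int.mod b i == 0 then d.insert i (d.getD i 0 + 1) else d) d) d) divcount).items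

-- ===== PORT B =====
-- the 'while m > 0' digit loop of Source B; the p ≤ 1 guard is only for termination (p is 2,3,5,7)
def prodDigits (p : Int) (m : Int) : Int :=
  if h : m ≤ 0 ∨ p ≤ 1 then 1
  else (PySem.Int.mod m p + 1) * prodDigits p (PySem.Int.floordiv m p)
termination_by m.toNat
decreasing_by
  push Not at h
  have h2 : PySem.Int.floordiv m p = m / p := PySem.Int.floordiv_eq_ediv_of_pos (by omega)
  rw [h2]
  have hlt : m / p < m := Int.ediv_lt_of_lt_mul (by omega) (by nlinarith)
  omega

def checkdiv7_alt (rows : Int) : List (Int × Int) :=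
  let nRows := if rows > 1 then rows else 1
  (([2, 3, 5, 7] : List Int).foldl (fun d p =>
      d.insert p ((PySem.List.pyRange 0 nRows 1).foldl
        (fun t n => t + (n + 1 - prodDigits p n)) 0))
    PySem.Dict.empty).items

-- ===== PRECONDITION & SPEC =====
def Spec_checkdiv7 (rows : Int) (out : List (Int × Int)) : Prop := out = checkdiv7_alt rows
instance (rows : Int) (out : List (Int × Int)) : Decidable (Spec_checkdiv7 rows out) := by unfold Spec_checkdiv7; infer_instance

-- ===== CLAIM (what is proved, stated in full; the proofs are below) =====
def Claim_equal_checkdiv7 : Prop := ∀ (rows : Int), Dom_checkdiv7 rows → Spec_checkdiv7 rows (checkdiv7 rows)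

-- ===== LEMMAS AND PROOFS =====

-- Row n of Pascal's triangle, as the list of binomial coefficients.
def binRow (n : Nat) : List Int := (List.range (n + 1)).map fun k => ((n.choose k : Nat) : Int)

-- Product of (digit+1) over the base-p digits of n (Nat mirror of prodDigits).
def Phi (p n : Nat) : Nat :=
  if h : n = 0 ∨ p ≤ 1 then 1 else (n % p + 1) * Phi p (n / p)
termination_by n
decreasing_by
  push Not at h
  exact Nat.div_lt_self (by omega) (by omega)

theorem prodDigits_natCast (p n : Nat) (hp : 2 ≤ p) :
    prodDigits (p : Int) (n : Int) = ((Phi p n : Nat) : Int) := by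
  induction n using Nat.strong_induction_on with
  | _ n ih =>
    rw [prodDigits, Phi]
    by_cases h : n = 0
    · simp [h]
    · have h1 : ¬ ((n : Int) ≤ 0 ∨ (p : Int) ≤ 1) := by
        push Not; constructor <;> [omega; exact_mod_cast by omega]
      have h2 : ¬ (n = 0 ∨ p ≤ 1) := by omega
      rw [dif_neg h1, dif_neg h2]
      rw [PySem.Int.mod_natCast, PySem.Int.floordiv_natCast]
      rw [ih (n / p) (Nat.div_lt_self (by omega) (by omega))]
      push_cast
      ring

theorem binRow_getD (n j : Nat) (h : j < n + 1) :
    (binRow n).getD j 0 = ((n.choose j : Nat) : Int) := by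
  simp [binRow, List.getD_eq_getElem?_getD, h]

theorem g_eval (n j : Nat) (hj : j ≤ n) :
    PySem.List.pyGetD (0 :: binRow n) (↑j) 0 + PySem.List.pyGetD (0 :: binRow n) (↑j + 1) 0
      = (((n + 1).choose j : Nat) : Int) := by
  have e1 : ((j : Int) + 1) = ((j + 1 : Nat) : Int) := by push_cast; ring
  rw [e1, PySem.List.pyGetD_natCast, PySem.List.pyGetD_natCast]
  cases j with
  | zero =>
    rw [List.getD_cons_zero, List.getD_cons_succ, binRow_getD n 0 (by omega)]
    simp
  | succ t =>
    rw [List.getD_cons_succ, List.getD_cons_succ, binRow_getD n t (by omega),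
      binRow_getD n (t + 1) (by omega)]
    rw [Nat.choose_succ_succ]
    push_cast
    ring

theorem mirror_even (M : Nat) (c : Nat → Int) (hsym : ∀ t, t < 2 * M → c (2 * M - 1 - t) = c t) :
    (List.range M).map c ++ ((List.range M).map c).reverse = (List.range (2 * M)).map c := by
  apply List.ext_getElem
  · simp; omega
  · intro i h1 h2
    simp only [List.length_append, List.length_reverse, List.length_map, List.length_range] at h1
    by_cases hi : i < M
    · rw [List.getElem_append_left (by simpa using hi)]
      simp
    · rw [List.getElem_append_right (by simpa using hi)]
      rw [List.getElem_reverse]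
      simp only [List.length_map, List.length_range, List.getElem_map, List.getElem_range]
      have := hsym i (by omega)
      have heq : M - 1 - (i - M) = 2 * M - 1 - i := by omega
      rw [heq, this]

theorem mirror_odd (M : Nat) (c : Nat → Int) (hsym : ∀ t, t < 2 * M + 1 → c (2 * M - t) = c t) :
    (List.range (M + 1)).map c ++ (((List.range (M + 1)).map c).take M).reverse
      = (List.range (2 * M + 1)).map c := by
  rw [← List.map_take, List.take_range]
  have hmin : min M (M + 1) = M := by omega
  rw [hmin]
  apply List.ext_getElem
  · simp; omega
  · intro i h1 h2
    by_cases hi : i < M + 1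
    · rw [List.getElem_append_left (by simpa using hi)]
      simp
    · rw [List.getElem_append_right (by simpa using hi)]
      rw [List.getElem_reverse]
      simp only [List.length_map, List.length_range, List.getElem_map, List.getElem_range]
      have := hsym i (by simpa using h2)
      have heq : M - 1 - (i - (M + 1)) = 2 * M - i := by
        simp only [List.length_append, List.length_reverse, List.length_map,
          List.length_range] at h1
        omega
      rw [heq, this]

theorem nextrow_binRow (n : Nat) : nextrow (binRow n) = binRow (n + 1) := by
  have hlen : ((0 :: binRow n).length : Int) = ((n + 2 : Nat) : Int) := by
    simp [binRow]
    ring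
  rw [nextrow]
  simp only [hlen, PySem.List.foldl_append_singleton_eq_map]
  rw [show PySem.Int.mod ((n + 2 : Nat) : Int) 2 = (((n + 2) % 2 : Nat) : Int) from by
        exact_mod_cast PySem.Int.mod_natCast (n + 2) 2,
      show PySem.Int.floordiv ((n + 2 : Nat) : Int) 2 = (((n + 2) / 2 : Nat) : Int) from by
        exact_mod_cast PySem.Int.floordiv_natCast (n + 2) 2]
  have hc : ∀ (K : Nat), K ≤ n + 1 →
      ((PySem.List.pyRange 0 ((K : Nat) : Int) 1).map
        (fun i => PySem.List.pyGetD (0 :: binRow n) i 0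
          + PySem.List.pyGetD (0 :: binRow n) (i + 1) 0))
      = (List.range K).map (fun j => (((n + 1).choose j : Nat) : Int)) := by
    intro K hK
    rw [PySem.List.pyRange_zero_natCast, List.map_map]
    apply List.map_congr_left
    intro j hj
    have : j < K := List.mem_range.mp hj
    exact g_eval n j (by omega)
  by_cases hn : n % 2 = 0
  · have hcond : (((n + 2) % 2 : Nat) : Int) == 0 := by
      have : (n + 2) % 2 = 0 := by omega
      simp [this]
    rw [if_pos hcond]
    simp only [List.nil_append]
    rw [hc ((n + 2) / 2) (by omega)]
    set M : Nat := (n + 2) / 2 with hMdef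
    have h2M : n + 1 + 1 = 2 * M := by omega
    rw [binRow, h2M]
    exact mirror_even M _ (by
      intro t ht
      have h1 : t ≤ n + 1 := by omega
      have he : 2 * M - 1 - t = n + 1 - t := by omega
      rw [he]
      exact congrArg (fun z => ((z : Nat) : Int)) (Nat.choose_symm h1))
  · have hcond : ¬ ((((n + 2) % 2 : Nat) : Int) == 0) := by
      have : (n + 2) % 2 = 1 := by omega
      simp [this]
    rw [if_neg hcond]
    have e1 : ((n + 2 : Nat) : Int) + 1 = ((n + 3 : Nat) : Int) := by push_cast; ring
    rw [e1]
    rw [show PySem.Int.floordiv ((n + 3 : Nat) : Int) 2 = (((n + 3) / 2 : Nat) : Int) from by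
        exact_mod_cast PySem.Int.floordiv_natCast (n + 3) 2]
    rw [hc ((n + 3) / 2) (by omega)]
    simp only [List.nil_append]
    set M : Nat := (n + 1) / 2 with hMdef
    have hK : (n + 3) / 2 = M + 1 := by omega
    rw [hK]
    have hslice : PySem.List.slice
          ((List.range (M + 1)).map (fun j => (((n + 1).choose j : Nat) : Int))) none (some (-1))
        = ((List.range (M + 1)).map (fun j => (((n + 1).choose j : Nat) : Int))).take M := by
      have := PySem.List.slice_to_neg_natCast
        ((List.range (M + 1)).map (fun j => (((n + 1).choose j : Nat) : Int))) 1 (by omega)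
      simp only [Nat.cast_one] at this
      rw [this]
      simp
    rw [hslice]
    have h2M : n + 1 + 1 = 2 * M + 1 := by omega
    rw [binRow, h2M]
    exact mirror_odd M _ (by
      intro t ht
      have h1 : t ≤ n + 1 := by omega
      have he : 2 * M - t = n + 1 - t := by omega
      rw [he]
      exact congrArg (fun z => ((z : Nat) : Int)) (Nat.choose_symm h1))

theorem pascal_fold (l : List Int) (m : Nat) :
    l.foldl (fun tri _ => tri ++ [nextrow (PySem.List.pyGetD tri (-1) [])])
        ((List.range (m + 1)).map binRow)
      = (List.range (m + 1 + l.length)).map binRow := by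
  induction l generalizing m with
  | nil => simp
  | cons x t ih =>
    rw [List.foldl_cons]
    have h1 : (List.range (m + 1)).map binRow = (List.range m).map binRow ++ [binRow m] := by
      rw [List.range_succ, List.map_append]; simp
    rw [h1, PySem.List.pyGetD_neg_one_append_singleton, nextrow_binRow]
    have h2 : List.map binRow (List.range m) ++ [binRow m] ++ [binRow (m + 1)]
        = (List.range (m + 1 + 1)).map binRow := by
      rw [List.range_succ, List.map_append, List.range_succ, List.map_append]
      simp
    rw [h2, ih (m + 1)]
    congr 2
    simp
    omega

theorem pascal_eq (rows : Int) :
    pascal rows = (List.range ((rows - 1).toNat + 1)).map binRow := by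
  rw [pascal]
  have h0 : ([[1]] : List (List Int)) = (List.range (0 + 1)).map binRow := by
    simp [binRow]
  rw [h0, pascal_fold]
  congr 2
  have : PySem.List.pyRange 0 (rows - 1) 1
      = PySem.List.pyRange 0 (((rows - 1).toNat : Nat) : Int) 1 := by
    by_cases h : 0 ≤ rows - 1
    · rw [Int.toNat_of_nonneg h]
    · have e1 : PySem.List.pyRange 0 (rows - 1) 1 = [] := by
        simp [PySem.List.pyRange]; omega
      have e2 : ((rows - 1).toNat : Int) = 0 := by omega
      rw [e1, e2]
      simp [PySem.List.pyRange]
  rw [this, PySem.List.pyRange_zero_natCast]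
  simp
  omega

theorem dict_step (a b c e x : Int) :
    ([2, 3, 5, 7] : List Int).foldl (fun d i =>
        if PySem.Int.mod x i == 0 then d.insert i (d.getD i 0 + 1) else d)
      (PySem.Dict.mk [(2, a), (3, b), (5, c), (7, e)])
    = PySem.Dict.mk [(2, a + if PySem.Int.mod x 2 == 0 then 1 else 0),
        (3, b + if PySem.Int.mod x 3 == 0 then 1 else 0),
        (5, c + if PySem.Int.mod x 5 == 0 then 1 else 0),
        (7, e + if PySem.Int.mod x 7 == 0 then 1 else 0)] := by
  simp only [List.foldl_cons, List.foldl_nil]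
  by_cases h2 : PySem.Int.mod x 2 == 0 <;>
  by_cases h3 : PySem.Int.mod x 3 == 0 <;>
  by_cases h5 : PySem.Int.mod x 5 == 0 <;>
  by_cases h7 : PySem.Int.mod x 7 == 0 <;>
  simp only [h2, h3, h5, h7, Bool.false_eq_true, if_true, if_false] <;>
  simp [PySem.Dict.insert, PySem.Dict.contains, PySem.Dict.getD, PySem.Dict.get?]

theorem dict_fold (l : List Int) (a b c e : Int) :
    l.foldl (fun d x => ([2, 3, 5, 7] : List Int).foldl (fun d i =>
        if PySem.Int.mod x i == 0 then d.insert i (d.getD i 0 + 1) else d) d)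
      (PySem.Dict.mk [(2, a), (3, b), (5, c), (7, e)])
    = PySem.Dict.mk [(2, a + (l.countP (fun x => PySem.Int.mod x 2 == 0) : Int)),
        (3, b + (l.countP (fun x => PySem.Int.mod x 3 == 0) : Int)),
        (5, c + (l.countP (fun x => PySem.Int.mod x 5 == 0) : Int)),
        (7, e + (l.countP (fun x => PySem.Int.mod x 7 == 0) : Int))] := by
  induction l generalizing a b c e with
  | nil => simp only [List.foldl_nil, List.countP_nil, Nat.cast_zero, add_zero]
  | cons x t ih =>
    rw [List.foldl_cons, dict_step, ih]
    simp only [List.countP_cons]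
    split_ifs <;> simp <;> omega

-- ===== the Lucas/Kummer counting argument =====

theorem card_filter_range_eq_countP (m : Nat) (q : Nat → Bool) :
    ((Finset.range m).filter (fun k => q k)).card = (List.range m).countP q := by
  induction m with
  | zero => simp
  | succ m ih =>
    rw [Finset.range_add_one, List.range_succ, Finset.filter_insert, List.countP_append]
    by_cases h : q m <;> simp [h, ih, Finset.card_insert_of_notMem]

theorem not_dvd_choose_of_lt (p a b : Nat) (hp : p.Prime) (ha : a < p) (hb : b ≤ a) :
    ¬ p ∣ a.choose b := by
  intro h
  have h2 := Nat.choose_mul_factorial_mul_factorial hb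
  have hf : p ∣ a.factorial := h2 ▸ Dvd.dvd.mul_right (Dvd.dvd.mul_right h _) _
  have := (Nat.Prime.dvd_factorial hp).mp hf
  omega

theorem lucas_step (p n k : Nat) (hp : p.Prime) :
    (¬ p ∣ n.choose k) ↔ k % p ≤ n % p ∧ ¬ p ∣ (n / p).choose (k / p) := by
  have : Fact p.Prime := ⟨hp⟩
  have hmod : n.choose k ≡ ((n % p).choose (k % p)) * ((n / p).choose (k / p)) [MOD p] :=
    Choose.choose_modEq_choose_mod_mul_choose_div_nat
  have hdvd : p ∣ n.choose k ↔ p ∣ ((n % p).choose (k % p)) * ((n / p).choose (k / p)) := by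
    rw [← Nat.modEq_zero_iff_dvd, ← Nat.modEq_zero_iff_dvd]
    exact ⟨hmod.symm.trans, hmod.trans⟩
  rw [hdvd, hp.dvd_mul]
  have h1 : p ∣ ((n % p).choose (k % p)) ↔ ¬ (k % p ≤ n % p) := by
    constructor
    · intro h hc
      exact not_dvd_choose_of_lt p (n % p) (k % p) hp (Nat.mod_lt _ hp.pos) hc h
    · intro h
      rw [Nat.choose_eq_zero_of_lt (by omega)]
      exact dvd_zero p
  tauto

theorem card_nondvd (p : Nat) (hp : p.Prime) : ∀ n,
    ((Finset.range (n + 1)).filter (fun k => ¬ p ∣ n.choose k)).card = Phi p n := by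
  intro n
  induction n using Nat.strong_induction_on with
  | _ n ih =>
    by_cases h0 : n = 0
    · subst h0
      rw [Phi]
      rw [dif_pos (Or.inl rfl)]
      rw [Finset.filter_true_of_mem]
      · simp
      · intro k hk
        simp only [Finset.mem_range] at hk
        have : k = 0 := by omega
        subst this
        simp only [Nat.choose_self]
        intro h
        have := Nat.le_of_dvd one_pos h
        have := hp.two_le
        omega
    · have hp2 := hp.two_le
      have hrec : Phi p n = (n % p + 1) * Phi p (n / p) := by
        rw [Phi, dif_neg (by omega)]
      rw [hrec, ← ih (n / p) (Nat.div_lt_self (by omega) (by omega))]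
      rw [← Finset.card_range (n % p + 1), ← Finset.card_product]
      apply Finset.card_bij' (i := fun k _ => (k % p, k / p))
        (j := fun q _ => q.2 * p + q.1)
      · intro k hk
        simp only [Finset.mem_filter, Finset.mem_range] at hk
        obtain ⟨hk1, hk2⟩ := hk
        obtain ⟨hle, hnd⟩ := (lucas_step p n k hp).mp hk2
        simp only [Finset.mem_product, Finset.mem_range, Finset.mem_filter]
        refine ⟨by omega, ?_, hnd⟩
        have hne : (n / p).choose (k / p) ≠ 0 := fun h => hnd (h ▸ dvd_zero p)
        by_contra hgt
        exact hne (Nat.choose_eq_zero_of_lt (by omega))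
      · intro q hq
        simp only [Finset.mem_product, Finset.mem_range, Finset.mem_filter] at hq
        obtain ⟨hr, hq2, hnd⟩ := hq
        have hqle : q.2 ≤ n / p := by omega
        have hrlt : q.1 < p := by
          have := Nat.mod_lt n (y := p) (by omega)
          omega
        have hmodeq : (q.2 * p + q.1) % p = q.1 := by
          rw [mul_comm, Nat.mul_add_mod, Nat.mod_eq_of_lt hrlt]
        have hdiveq : (q.2 * p + q.1) / p = q.2 := by
          rw [mul_comm, Nat.mul_add_div (by omega), Nat.div_eq_of_lt hrlt, add_zero]
        simp only [Finset.mem_filter, Finset.mem_range]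
        constructor
        · have h1 : p * (n / p) + n % p = n := Nat.div_add_mod n p
          nlinarith
        · rw [lucas_step p n _ hp, hmodeq, hdiveq]
          exact ⟨by omega, hnd⟩
      · intro k hk
        simp only
        rw [mul_comm]
        exact Nat.div_add_mod k p
      · intro q hq
        simp only [Finset.mem_product, Finset.mem_range, Finset.mem_filter] at hq
        obtain ⟨hr, hq2, hnd⟩ := hq
        have hrlt : q.1 < p := by
          have := Nat.mod_lt n (y := p) (by omega)
          omega
        have hmodeq : (q.2 * p + q.1) % p = q.1 := by
          rw [mul_comm, Nat.mul_add_mod, Nat.mod_eq_of_lt hrlt]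
        have hdiveq : (q.2 * p + q.1) / p = q.2 := by
          rw [mul_comm, Nat.mul_add_div (by omega), Nat.div_eq_of_lt hrlt, add_zero]
        simp only [hmodeq, hdiveq]

theorem Phi_le (p : Nat) (hp : p.Prime) (n : Nat) : Phi p n ≤ n + 1 := by
  rw [← card_nondvd p hp n]
  calc ((Finset.range (n + 1)).filter _).card ≤ (Finset.range (n + 1)).card :=
        Finset.card_filter_le _ _
    _ = n + 1 := Finset.card_range _

theorem countP_nondvd (p : Nat) (hp : p.Prime) (n : Nat) :
    (List.range (n + 1)).countP (fun k => !decide (p ∣ n.choose k)) = Phi p n := by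
  rw [← card_filter_range_eq_countP, ← card_nondvd p hp n]
  congr 1
  apply Finset.filter_congr
  intro k _
  simp

theorem countP_dvd (p : Nat) (hp : p.Prime) (n : Nat) :
    (List.range (n + 1)).countP (fun k => decide (p ∣ n.choose k)) = n + 1 - Phi p n := by
  have hsplit := List.length_eq_countP_add_countP (l := List.range (n + 1))
    (fun k => decide (p ∣ n.choose k))
  have hc : (List.range (n + 1)).countP (fun a => decide ¬(decide (p ∣ n.choose a)) = true)
      = (List.range (n + 1)).countP (fun k => !decide (p ∣ n.choose k)) := by
    apply List.countP_congr
    intro a _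
    simp
  rw [List.length_range] at hsplit
  rw [hc, countP_nondvd p hp n] at hsplit
  omega

theorem row_count (p : Nat) (hp : p.Prime) (n : Nat) :
    ((binRow n).countP (fun x => PySem.Int.mod x (p : Int) == 0) : Int)
      = (n : Int) + 1 - prodDigits (p : Int) (n : Int) := by
  rw [binRow, List.countP_map]
  have hcong : (List.range (n + 1)).countP
        ((fun x => PySem.Int.mod x (p : Int) == 0) ∘ fun k => ((n.choose k : Nat) : Int))
      = (List.range (n + 1)).countP (fun k => decide (p ∣ n.choose k)) := by
    apply List.countP_congr
    intro k _
    simp only [Function.comp_apply, PySem.Int.mod_natCast]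
    simp [Int.natCast_dvd_natCast, Nat.dvd_iff_mod_eq_zero]
  rw [hcong, countP_dvd p hp n, prodDigits_natCast p n hp.two_le]
  have := Phi_le p hp n
  push_cast [Nat.cast_sub this]
  ring

theorem total_count (p : Nat) (hp : p.Prime) (N : Nat) :
    ((((List.range N).map binRow).flatten.countP (fun x => PySem.Int.mod x (p : Int) == 0)) : Int)
      = ((List.range N).map
          (fun n : Nat => (n : Int) + 1 - prodDigits (p : Int) (n : Int))).sum := by
  induction N with
  | zero => simp
  | succ N ih =>
    rw [List.range_succ, List.map_append, List.flatten_append, List.countP_append,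
      List.map_append, List.sum_append]
    push_cast
    rw [ih]
    simp [row_count p hp N]

theorem component (p : Nat) (hp : p.Prime) (rows : Int) :
    (((pascal rows).flatten.countP (fun x => PySem.Int.mod x (p : Int) == 0)) : Int)
      = (PySem.List.pyRange 0 (if rows > 1 then rows else 1) 1).foldl
          (fun t n => t + (n + 1 - prodDigits (p : Int) n)) 0 := by
  rw [pascal_eq, PySem.List.foldl_add, total_count p hp ((rows - 1).toNat + 1)]
  have hn : (if rows > 1 then rows else 1) = (((rows - 1).toNat + 1 : Nat) : Int) := by
    split_ifs with h <;> push_cast <;> omega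
  rw [hn, PySem.List.pyRange_zero_natCast, List.map_map]
  simp only [Function.comp_def, zero_add]

-- ===== VERDICT (by name: the statement is the Claim_ definition above) =====
theorem checkdiv7_spec : Claim_equal_checkdiv7 := by
  intro rows _
  unfold Spec_checkdiv7
  simp only [checkdiv7, checkdiv7_alt]
  rw [← List.foldl_flatten]
  have hd0 : (PySem.Dict.ofList [(2, 0), (3, 0), (5, 0), (7, 0)] : PySem.Dict Int Int)
      = PySem.Dict.mk [(2, 0), (3, 0), (5, 0), (7, 0)] := by decide
  rw [hd0, dict_fold]
  have h2 := component 2 (by norm_num) rows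
  have h3 := component 3 (by norm_num) rows
  have h5 := component 5 (by norm_num) rows
  have h7 := component 7 (by norm_num) rows
  simp only [Nat.cast_ofNat] at h2 h3 h5 h7
  have hB : ∀ (f : Int → Int),
      ([2, 3, 5, 7] : List Int).foldl (fun d p => d.insert p (f p)) PySem.Dict.empty
        = PySem.Dict.mk [(2, f 2), (3, f 3), (5, f 5), (7, f 7)] := by
    intro f
    rfl
  rw [hB (fun p => (PySem.List.pyRange 0 (if rows > 1 then rows else 1) 1).foldl
        (fun t n => t + (n + 1 - prodDigits p n)) 0)]
  simp only [zero_add]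
  rw [h2, h3, h5, h7]
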